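-- pv_equiv track=rewrite | github.com/MrIceAreBee11/Project_CV_Analyzer_3Month | cv-analyzer/src/infrastructure/parsers/regex/skills_parser.py | _get_section_for_line
-- ===== SOURCE A (Python) =====
-- def _get_section_for_line(
--
--     line_idx: int,
--     sections: dict
-- ) -> str:
--     """
--     Tentukan section mana yang paling dekat sebelum baris ini.
--
--     Args:
--         line_idx: index baris saat ini
--         sections: dict hasil _detect_sections
--
--     Returns:
--         Nama section (str), default "unknown"
--     """
--     closest_section = "unknown"
--     closest_distance = float("inf")
--
--     for section_name, indices in sections.items():
--         for section_line_idx in indices: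
--             # Section harus berada SEBELUM baris ini
--             if section_line_idx <= line_idx:
--                 distance = line_idx - section_line_idx
--                 if distance < closest_distance:
--                     closest_distance = distance
--                     closest_section = section_name
--     # Fallback: jika masih unknown DAN baris ada di area awal dokumen
--     # kemungkinan besar skill ditemukan di paragraf summary/header
--     if closest_section == "unknown" and line_idx <= 30:
--       closest_section = "summary"
--
--     return closest_section
-- ===== SOURCE B (Python) =====
-- def _get_section_for_line(line_idx: int, sections: dict) -> str:
--     # Build an index -> section-name table once (first section wins for a
--     # repeated index, matching dict iteration order), then pick the largest
--     # eligible index instead of tracking a running minimum distance.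
--     table = {}
--     for section_name, indices in sections.items():
--         for i in indices:
--             if i not in table:
--                 table[i] = section_name
--     eligible = [k for k in table if k <= line_idx]
--     closest_section = table[max(eligible)] if eligible else "unknown"
--     if closest_section == "unknown" and line_idx <= 30:
--         closest_section = "summary"
--     return closest_section
-- ===== Notes on version B (the rewrite author's own statement) =====
-- stated objective: alternative
-- what changed: Instead of tracking a running minimum distance over a nested scan, B builds a first-wins index-to-section table once and then returns the table entry at the maximum eligible (<= line_idx) index, with the same summary fallback.
import Mathlib
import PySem

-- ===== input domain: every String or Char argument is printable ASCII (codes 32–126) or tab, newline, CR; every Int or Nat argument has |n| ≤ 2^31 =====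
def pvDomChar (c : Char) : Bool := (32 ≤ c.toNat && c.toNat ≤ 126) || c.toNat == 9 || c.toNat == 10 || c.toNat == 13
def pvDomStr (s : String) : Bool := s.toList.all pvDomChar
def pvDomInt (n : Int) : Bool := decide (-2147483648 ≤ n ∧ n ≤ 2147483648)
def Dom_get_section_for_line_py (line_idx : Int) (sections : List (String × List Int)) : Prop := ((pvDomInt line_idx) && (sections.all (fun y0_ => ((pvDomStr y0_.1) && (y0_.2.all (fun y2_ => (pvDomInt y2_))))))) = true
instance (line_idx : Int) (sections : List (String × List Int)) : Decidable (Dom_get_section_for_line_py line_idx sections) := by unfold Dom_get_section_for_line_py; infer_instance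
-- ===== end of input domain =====

-- B replaces A's running nearest-distance scan by a first-wins index→name table
-- plus a max over the eligible indices (alternative decomposition, same cost).

-- ===== PORT A =====
def get_section_for_line_py (line_idx : Int) (sections : List (String × List Int)) : String :=
  let st := sections.foldl (fun st p =>
    p.2.foldl (fun st i =>
      if i ≤ line_idx then
        let distance := line_idx - i
        match st.2 with
        | none => (p.1, some distance)
        | some cd => if distance < cd then (p.1, some distance) else st
      else st) st) ("unknown", (none : Option Int))
  if st.1 = "unknown" ∧ line_idx ≤ 30 then "summary" else st.1

-- ===== PORT B =====
def get_section_for_line_py_alt (line_idx : Int) (sections : List (String × List Int)) : String :=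
  let table := sections.foldl (fun t p =>
    p.2.foldl (fun t i => if t.contains i then t else t.insert i p.1) t)
    (PySem.Dict.empty : PySem.Dict Int String)
  let eligible := table.keys.filter (fun k => decide (k ≤ line_idx))
  let closest :=
    match PySem.List.max? eligible (fun x => x) with
    | some m => table.getD m "unknown"
    | none => "unknown"
  if closest = "unknown" ∧ line_idx ≤ 30 then "summary" else closest

-- ===== PRECONDITION & SPEC =====
def Spec_get_section_for_line_py (line_idx : Int) (sections : List (String × List Int)) (out : String) : Prop := out = get_section_for_line_py_alt line_idx sections
instance (line_idx : Int) (sections : List (String × List Int)) (out : String) : Decidable (Spec_get_section_for_line_py line_idx sections out) := by unfold Spec_get_section_for_line_py; infer_instance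

-- ===== CLAIM (what is proved, stated in full; the proofs are below) =====
def Claim_equal_get_section_for_line_py : Prop := ∀ (line_idx : Int) (sections : List (String × List Int)), Dom_get_section_for_line_py line_idx sections → Spec_get_section_for_line_py line_idx sections (get_section_for_line_py line_idx sections)

-- ===== LEMMAS AND PROOFS =====

-- A's loop step, on one flattened (name, index) pair
def pvStepA (L : Int) (st : String × Option Int) (x : String × Int) : String × Option Int :=
  if x.2 ≤ L then
    let distance := L - x.2
    match st.2 with
    | none => (x.1, some distance)
    | some cd => if distance < cd then (x.1, some distance) else st
  else st

-- B's table step, on one flattened pair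
def pvStepB (t : PySem.Dict Int String) (x : String × Int) : PySem.Dict Int String :=
  if t.contains x.2 then t else t.insert x.2 x.1

-- common reference: running first-wins maximum eligible pair
def pvMerge (L : Int) (acc : Option (String × Int)) (x : String × Int) : Option (String × Int) :=
  if x.2 ≤ L then
    match acc with
    | none => some x
    | some y => if y.2 < x.2 then some x else acc
  else acc

def pvToA (L : Int) (acc : Option (String × Int)) : String × Option Int :=
  match acc with
  | none => ("unknown", none)
  | some (n, i) => (n, some (L - i))

def pvPairs (sections : List (String × List Int)) : List (String × Int) :=
  sections.flatMap (fun p => p.2.map (fun i => (p.1, i)))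

def pvRes (L : Int) (t : PySem.Dict Int String) : Option (String × Int) :=
  match PySem.List.max? (t.keys.filter (fun k => decide (k ≤ L))) (fun x => x) with
  | some m => some (t.getD m "unknown", m)
  | none => none

theorem pvStepA_toA (L : Int) (acc : Option (String × Int)) (x : String × Int) :
    pvStepA L (pvToA L acc) x = pvToA L (pvMerge L acc x) := by
  rcases x with ⟨n, i⟩
  cases acc with
  | none => by_cases h : i ≤ L <;> simp [pvStepA, pvToA, pvMerge, h]
  | some y =>
    rcases y with ⟨m, j⟩
    by_cases h : i ≤ L
    · have : (L - i < L - j) ↔ (j < i) := by omega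
      by_cases hj : j < i <;>
        simp [pvStepA, pvToA, pvMerge, h, this, hj]
    · simp [pvStepA, pvToA, pvMerge, h]

theorem pvFoldA_eq (L : Int) (q : List (String × Int)) (acc : Option (String × Int)) :
    q.foldl (pvStepA L) (pvToA L acc) = pvToA L (q.foldl (pvMerge L) acc) := by
  induction q generalizing acc with
  | nil => rfl
  | cons x q ih => simp only [List.foldl_cons, pvStepA_toA]; exact ih _

theorem pvMax?_append_singleton (l : List Int) (i : Int) :
    PySem.List.max? (l ++ [i]) (fun x => x) =
      some (match PySem.List.max? l (fun x => x) with
            | none => i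
            | some m => max m i) := by
  cases l with
  | nil => simp [PySem.List.max?]
  | cons x t =>
    rw [List.cons_append, PySem.List.max?_id_cons, PySem.List.max?_id_cons,
      List.foldl_append]
    simp

theorem pvResB (L : Int) (q : List (String × Int)) :
    (q.foldl pvStepB PySem.Dict.empty).keys.Nodup ∧
    pvRes L (q.foldl pvStepB PySem.Dict.empty) = q.foldl (pvMerge L) none := by
  induction q using List.reverseRecOn with
  | nil => exact ⟨by simp [PySem.Dict.keys_empty], by simp [pvRes, PySem.Dict.keys_empty, PySem.List.max?]⟩
  | append_singleton q x ih =>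
    obtain ⟨hnd, ih⟩ := ih
    rw [List.foldl_append, List.foldl_append]
    set t := q.foldl pvStepB PySem.Dict.empty with ht
    rcases x with ⟨n, i⟩
    simp only [List.foldl_cons, List.foldl_nil]
    by_cases hc : t.contains i
    · -- key already present: table unchanged, merge must keep the accumulator
      have hik : i ∈ t.keys := (PySem.Dict.contains_iff_mem_keys _ _).1 hc
      refine ⟨by simpa [pvStepB, hc] using hnd, ?_⟩
      rw [show pvStepB t (n, i) = t by simp [pvStepB, hc]]
      rw [ih.symm] at *
      by_cases hiL : i ≤ L
      · have hie : i ∈ t.keys.filter (fun k => decide (k ≤ L)) := by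
          simp [List.mem_filter, hik, hiL]
        rcases hm : PySem.List.max? (t.keys.filter (fun k => decide (k ≤ L))) (fun x => x) with
          _ | m
        · exact absurd ((PySem.List.max?_eq_none_iff _ _).1 hm ▸ hie) (List.not_mem_nil)
        · have him : i ≤ m := PySem.List.max?_isMax hm i hie
          simp [pvRes, pvMerge, hm, hiL, show ¬ m < i by omega]
      · simp [pvRes, pvMerge, hiL]
    · -- fresh key: appended at the end of the table
      have hik : i ∉ t.keys := fun h => hc ((PySem.Dict.contains_iff_mem_keys _ _).2 h)
      have hc' : t.contains i = false := by simpa using hc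
      have hkeys : (pvStepB t (n, i)).keys = t.keys ++ [i] := by
        simp [pvStepB, hc', PySem.Dict.keys_insert_of_not_contains]
      refine ⟨by rw [hkeys]; simp [List.nodup_append, hnd]; intro a ha h; exact hik (h ▸ ha), ?_⟩
      have hgetD : ∀ m, (pvStepB t (n, i)).getD m "unknown" =
          if m = i then n else t.getD m "unknown" := by
        intro m; simp [pvStepB, hc, PySem.Dict.getD_insert]
      by_cases hiL : i ≤ L
      · have hfil : (pvStepB t (n, i)).keys.filter (fun k => decide (k ≤ L)) =
            t.keys.filter (fun k => decide (k ≤ L)) ++ [i] := by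
          rw [hkeys, List.filter_append]; simp [hiL]
        rcases hm : PySem.List.max? (t.keys.filter (fun k => decide (k ≤ L))) (fun x => x) with
          _ | m
        · have he : t.keys.filter (fun k => decide (k ≤ L)) = [] := (PySem.List.max?_eq_none_iff _ _).1 hm
          simp [pvRes, hm] at ih
          simp [pvRes, hfil, he, PySem.List.max?, ← ih, pvMerge, hiL, hgetD]
        · have hmk : m ∈ t.keys := by
            have := PySem.List.max?_mem hm
            exact (List.mem_filter.1 this).1
          have hmi : m ≠ i := fun h => hik (h ▸ hmk)
          have hmL : m ≤ L := by
            have := (List.mem_filter.1 (PySem.List.max?_mem hm)).2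
            simpa using this
          simp only [pvRes, hfil, pvMax?_append_singleton, hm]
          simp [pvRes, hm] at ih
          by_cases hlt : m < i
          · simp [show max m i = i by omega, ← ih, pvMerge, hiL, hlt, hgetD]
          · have : max m i = m := by omega
            simp [this, ← ih, pvMerge, hiL, hlt, hgetD, hmi]
      · -- index beyond line_idx: not eligible, merge is a no-op
        have hfil : (pvStepB t (n, i)).keys.filter (fun k => decide (k ≤ L)) =
            t.keys.filter (fun k => decide (k ≤ L)) := by
          rw [hkeys, List.filter_append]; simp [hiL]
        rcases hm : PySem.List.max? (t.keys.filter (fun k => decide (k ≤ L))) (fun x => x) with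
          _ | m
        · simp [pvRes, hfil, hm, ← ih, pvMerge, hiL]
        · have hmk : m ∈ t.keys := (List.mem_filter.1 (PySem.List.max?_mem hm)).1
          have hmi : m ≠ i := fun h => hik (h ▸ hmk)
          simp [pvRes, hfil, hm, ← ih, pvMerge, hiL, hgetD, hmi]

theorem pvFold_flat {α : Type} (g : α → (String × Int) → α) (sections : List (String × List Int)) (init : α) :
    sections.foldl (fun a p => p.2.foldl (fun a i => g a (p.1, i)) a) init =
      (pvPairs sections).foldl g init := by
  rw [pvPairs, List.foldl_flatMap]
  simp [List.foldl_map]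

-- ===== VERDICT (by name: the statement is the Claim_ definition above) =====
theorem get_section_for_line_py_spec : Claim_equal_get_section_for_line_py := by
  intro L sections _
  unfold Spec_get_section_for_line_py get_section_for_line_py get_section_for_line_py_alt
  obtain ⟨hnd, hres⟩ := pvResB L (pvPairs sections)
  rw [show (fun (st : String × Option Int) (p : String × List Int) =>
        p.2.foldl (fun st i =>
          if i ≤ L then
            let distance := L - i
            match st.2 with
            | none => (p.1, some distance)
            | some cd => if distance < cd then (p.1, some distance) else st
          else st) st) =
      (fun st p => p.2.foldl (fun st i => pvStepA L st (p.1, i)) st) by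
        funext st p; simp [pvStepA]]
  rw [show (fun (t : PySem.Dict Int String) (p : String × List Int) =>
        p.2.foldl (fun t i => if t.contains i then t else t.insert i p.1) t) =
      (fun t p => p.2.foldl (fun t i => pvStepB t (p.1, i)) t) by
        funext t p; simp [pvStepB]]
  rw [pvFold_flat (pvStepA L), pvFold_flat pvStepB]
  rw [show ("unknown", (none : Option Int)) = pvToA L none from rfl, pvFoldA_eq]
  rw [← hres]
  rcases hm : PySem.List.max? (((pvPairs sections).foldl pvStepB PySem.Dict.empty).keys.filter
      (fun k => decide (k ≤ L))) (fun x => x) with _ | m <;>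
    simp [pvRes, hm, pvToA]
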